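-- pv_equiv track=rewrite | github.com/shastrihm/DemandAwareSkipGraphs | static_optimal_search.py | interleaved_tupled_SG
-- ===== SOURCE A (Python) =====
-- def interleaved_tupled_SG(n):
--     """
--     returns the interleaved skip graph on n (power of 2) nodes
--     """
--     base = list(range(n))
--     SG = [base]
--
--     def helper(L):
--         if len(L) == 1:
--             return
--         if len(L) == 2:
--             SG.append([L[0]])
--             SG.append([L[1]])
--             return
--         l = [i for i in L if L.index(i) % 2 == 0]
--         r = [i for i in L if L.index(i) % 2 != 0]
--         SG.append(l)
--         SG.append(r)
--         helper(l)
--         helper(r)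
--
--     helper(base)
--     SG = (tuple(x) for x in SG)
--     return tuple(SG)
-- ===== SOURCE B (Python) =====
-- def interleaved_tupled_SG(n):
--     """
--     returns the interleaved skip graph on n (power of 2) nodes
--     (iterative worklist version: explicit stack instead of recursion,
--     single positional even/odd split instead of quadratic L.index scans)
--     """
--     base = list(range(n))
--     SG = [base]
--     stack = [base]
--     while stack:
--         L = stack.pop()
--         if len(L) < 2:
--             continue
--         l, r = [], []
--         for i, x in enumerate(L):
--             if i % 2 == 0:
--                 l.append(x)
--             else:
--                 r.append(x)
--         SG.append(l)
--         SG.append(r)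
--         if len(L) > 2:
--             stack.append(r)
--             stack.append(l)
--     return tuple(tuple(x) for x in SG)
-- ===== Notes on version B (the rewrite author's own statement) =====
-- stated objective: faster
-- what changed: Replaces the recursive helper by an iterative explicit-stack worklist (push right then left for the same pre-order) and replaces the two quadratic L.index-based comprehensions by one positional enumerate pass that builds the even/odd halves together.
-- crash fix: For n <= 0 A falls into unbounded recursion on the empty base list and raises RecursionError; B's worklist simply skips lists that are too short to split and returns ((),). — e.g. on interleaved_tupled_SG(0): A raises RecursionError, B returns [[]]
import Mathlib
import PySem

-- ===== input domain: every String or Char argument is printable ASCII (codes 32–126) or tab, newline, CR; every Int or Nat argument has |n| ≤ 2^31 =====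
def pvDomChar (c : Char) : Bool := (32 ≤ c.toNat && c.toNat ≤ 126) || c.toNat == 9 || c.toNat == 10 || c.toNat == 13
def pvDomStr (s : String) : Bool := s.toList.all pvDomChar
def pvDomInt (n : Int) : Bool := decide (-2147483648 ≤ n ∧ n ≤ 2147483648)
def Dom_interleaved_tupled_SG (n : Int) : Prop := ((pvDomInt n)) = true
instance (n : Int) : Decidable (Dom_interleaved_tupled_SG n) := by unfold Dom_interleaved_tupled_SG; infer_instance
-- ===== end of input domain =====

-- B replaces A's recursive helper with quadratic L.index comprehensions by an explicit-stack
-- worklist doing one positional enumerate split per list (faster in a timing run).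

-- ===== PORT A =====
-- A's helper mutates SG; ported as returning the list of entries it appends.
-- The Python recursion diverges on the empty list (only reachable for n ≤ 0, outside Pre_);
-- the port uses a fuel guard (fuel ≥ L.length suffices inside Pre_) only to be total.
def pvA_helper : Nat → List Int → List (List Int)
  | 0, _ => []
  | fuel+1, L =>
    if L.length = 1 then []
    else if L.length = 2 then
      -- L[0], L[1]: in range in this branch, default never used
      [[PySem.List.pyGetD L 0 0], [PySem.List.pyGetD L 1 0]]
    else
      let l := L.filter (fun i => ((PySem.List.index? L i).getD 0) % 2 == 0)
      let r := L.filter (fun i => ((PySem.List.index? L i).getD 0) % 2 != 0)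
      [l, r] ++ pvA_helper fuel l ++ pvA_helper fuel r

def interleaved_tupled_SG (n : Int) : List (List Int) :=
  let base := PySem.List.pyRange 0 n 1
  base :: pvA_helper (n.toNat + 1) base

-- ===== PORT B =====
-- the enumerate split loop of Source B: one pass building (l, r)
def pvB_split (L : List Int) : List Int × List Int :=
  (PySem.List.enumerate L 0).foldl
    (fun (acc : List Int × List Int) p =>
      if p.1 % 2 == 0 then (acc.1 ++ [p.2], acc.2) else (acc.1, acc.2 ++ [p.2]))
    ([], [])

-- the while loop over the explicit stack (top = head); fuel only to be total,
-- 2*n+1 suffices inside Pre_.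
def pvB_loop : Nat → List (List Int) → List (List Int) → List (List Int)
  | 0, _, SG => SG
  | fuel+1, stack, SG =>
    match stack with
    | [] => SG
    | L :: rest =>
      if L.length < 2 then pvB_loop fuel rest SG
      else
        let p := pvB_split L
        let SG' := SG ++ [p.1, p.2]
        if L.length > 2 then pvB_loop fuel (p.1 :: p.2 :: rest) SG'
        else pvB_loop fuel rest SG'

def interleaved_tupled_SG_alt (n : Int) : List (List Int) :=
  let base := PySem.List.pyRange 0 n 1
  pvB_loop (2 * n.toNat + 1) [base] [base]

-- ===== PRECONDITION & SPEC =====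
-- For n ≤ 0 the Python A recurses forever on the empty list (RecursionError); excluded.
def Pre_interleaved_tupled_SG (n : Int) : Prop := 1 ≤ n
instance (n : Int) : Decidable (Pre_interleaved_tupled_SG n) := by unfold Pre_interleaved_tupled_SG; infer_instance
def pvWitness_interleaved_tupled_SG : Int := 4

-- For n ≤ 0 A recurses forever on the empty base list (RecursionError); B's worklist skips it and returns ((),).
def Raises_interleaved_tupled_SG (n : Int) : Prop := n ≤ 0
instance (n : Int) : Decidable (Raises_interleaved_tupled_SG n) := by unfold Raises_interleaved_tupled_SG; infer_instance
def pvRaiseWitness_interleaved_tupled_SG : Int := 0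
def pvRaiseWitnessOut_interleaved_tupled_SG : List (List Int) := [[]]

def Spec_interleaved_tupled_SG (n : Int) (out : List (List Int)) : Prop := out = interleaved_tupled_SG_alt n
instance (n : Int) (out : List (List Int)) : Decidable (Spec_interleaved_tupled_SG n out) := by unfold Spec_interleaved_tupled_SG; infer_instance

-- ===== CLAIM (what is proved, stated in full; the proofs are below) =====
def Claim_equal_interleaved_tupled_SG : Prop := ∀ (n : Int), Dom_interleaved_tupled_SG n → Pre_interleaved_tupled_SG n → Spec_interleaved_tupled_SG n (interleaved_tupled_SG n)
def Claim_raises_interleaved_tupled_SG : Prop := (∀ (n : Int), Dom_interleaved_tupled_SG n → Raises_interleaved_tupled_SG n → ¬ Pre_interleaved_tupled_SG n) ∧ (Dom_interleaved_tupled_SG (pvRaiseWitness_interleaved_tupled_SG) ∧ Raises_interleaved_tupled_SG (pvRaiseWitness_interleaved_tupled_SG) ∧ interleaved_tupled_SG_alt (pvRaiseWitness_interleaved_tupled_SG) = pvRaiseWitnessOut_interleaved_tupled_SG)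

-- ===== LEMMAS AND PROOFS =====

-- the even/odd positional halves, structurally
mutual
def pvEvens : List Int → List Int
  | [] => []
  | a :: t => a :: pvOdds t
def pvOdds : List Int → List Int
  | [] => []
  | _ :: t => pvEvens t
end

theorem pvLen_evens_odds : ∀ L : List Int,
    (pvEvens L).length = (L.length + 1) / 2 ∧ (pvOdds L).length = L.length / 2 := by
  intro L
  induction L with
  | nil => simp [pvEvens, pvOdds]
  | cons a t ih =>
      simp only [pvEvens, pvOdds, List.length_cons]
      omega

theorem pvSublist_evens_odds : ∀ L : List Int,
    (pvEvens L).Sublist L ∧ (pvOdds L).Sublist L := by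
  intro L
  induction L with
  | nil => simp [pvEvens, pvOdds]
  | cons a t ih =>
      refine ⟨?_, ?_⟩
      · exact List.Sublist.cons₂ a ih.2
      · exact List.Sublist.cons a ih.1

-- the ideal emission: what helper appends after a list L
def pvE (L : List Int) : List (List Int) :=
  if h : L.length ≤ 1 then []
  else [pvEvens L, pvOdds L] ++ pvE (pvEvens L) ++ pvE (pvOdds L)
termination_by L.length
decreasing_by
  · have := (pvLen_evens_odds L).1; omega
  · have := (pvLen_evens_odds L).2; omega

-- A side: the index-parity filters are exactly the positional halves (needs Nodup)
theorem pvParityE (k : Nat) : (((k + 1) % 2 == 0) : Bool) = (k % 2 != 0) := by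
  rcases Nat.mod_two_eq_zero_or_one k with h | h <;> simp [Nat.add_mod, h]

theorem pvParityO (k : Nat) : (((k + 1) % 2 != 0) : Bool) = (k % 2 == 0) := by
  rcases Nat.mod_two_eq_zero_or_one k with h | h <;> simp [Nat.add_mod, h]

theorem pvFilter_idx (L : List Int) (h : L.Nodup) :
    L.filter (fun i => ((PySem.List.index? L i).getD 0) % 2 == 0) = pvEvens L ∧
    L.filter (fun i => ((PySem.List.index? L i).getD 0) % 2 != 0) = pvOdds L := by
  induction L with
  | nil => simp [pvEvens, pvOdds]
  | cons a t ih =>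
      have ha : a ∉ t := (List.nodup_cons.mp h).1
      have ih' := ih (List.nodup_cons.mp h).2
      have h0 : PySem.List.index? (a :: t) a = some 0 := PySem.List.index?_cons_self a t
      have hshift : ∀ (x : Int), x ∈ t →
          (PySem.List.index? (a :: t) x).getD 0 =
            (PySem.List.index? t x).getD 0 + 1 := by
        intro x hx
        have hne : a ≠ x := fun e => ha (e ▸ hx)
        rw [PySem.List.index?_cons_of_ne t hne]
        rcases Option.isSome_iff_exists.mp
            ((PySem.List.index?_isSome_iff (xs := t) (v := x)).mpr hx) with ⟨k, hk⟩
        rw [hk]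
        rfl
      constructor
      · rw [List.filter_cons, h0]
        simp only [Option.getD_some]
        rw [if_pos (show ((0 : Nat) % 2 == 0) = true by decide)]
        rw [List.filter_congr (l := t)
              (q := fun i => ((PySem.List.index? t i).getD 0) % 2 != 0)
              (by intro x hx
                  show ((PySem.List.index? (a :: t) x).getD 0 % 2 == 0) =
                    ((PySem.List.index? t x).getD 0 % 2 != 0)
                  rw [hshift x hx, pvParityE])]
        rw [ih'.2]
        simp [pvEvens]
      · rw [List.filter_cons, h0]
        simp only [Option.getD_some]
        rw [if_neg (by decide)]
        rw [List.filter_congr (l := t)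
              (q := fun i => ((PySem.List.index? t i).getD 0) % 2 == 0)
              (by intro x hx
                  show ((PySem.List.index? (a :: t) x).getD 0 % 2 != 0) =
                    ((PySem.List.index? t x).getD 0 % 2 == 0)
                  rw [hshift x hx, pvParityO])]
        rw [ih'.1]
        simp [pvOdds]

-- A's helper computes pvE given enough fuel, nodup, nonempty
theorem pvA_helper_eq : ∀ (fuel : Nat) (L : List Int), L.Nodup → 1 ≤ L.length →
    L.length ≤ fuel → pvA_helper fuel L = pvE L := by
  intro fuel
  induction fuel with
  | zero => intro L _ h1 h2; omega
  | succ f ih =>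
      intro L hnd h1 hle
      by_cases hL1 : L.length = 1
      · rw [pvA_helper, if_pos hL1, pvE, dif_pos (by omega)]
      · by_cases hL2 : L.length = 2
        · match L, hL2 with
          | [a, b], _ =>
            have hnil : pvE [a] = [] := by rw [pvE]; simp
            have hnil' : pvE [b] = [] := by rw [pvE]; simp
            rw [pvA_helper]
            norm_num
            rw [pvE]
            norm_num [pvEvens, pvOdds, hnil, hnil', PySem.List.pyGetD]
        · have hL3 : 3 ≤ L.length := by omega
          rw [pvA_helper, if_neg hL1, if_neg hL2]
          have hf := pvFilter_idx L hnd
          have hlev := (pvLen_evens_odds L).1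
          have hlod := (pvLen_evens_odds L).2
          have hsub := pvSublist_evens_odds L
          rw [hf.1, hf.2, pvE, dif_neg (by omega)]
          show [pvEvens L, pvOdds L] ++ pvA_helper f (pvEvens L) ++ pvA_helper f (pvOdds L) = _
          rw [ih (pvEvens L) (hsub.1.nodup hnd) (by omega) (by omega)]
          rw [ih (pvOdds L) (hsub.2.nodup hnd) (by omega) (by omega)]

-- B side: the enumerate fold is the positional split
theorem pvB_split_go : ∀ (L : List Int) (s : Int) (l r : List Int), 0 ≤ s →
    (PySem.List.enumerate L s).foldl
      (fun (acc : List Int × List Int) p =>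
        if p.1 % 2 == 0 then (acc.1 ++ [p.2], acc.2) else (acc.1, acc.2 ++ [p.2]))
      (l, r) =
    if s % 2 = 0 then (l ++ pvEvens L, r ++ pvOdds L) else (l ++ pvOdds L, r ++ pvEvens L) := by
  intro L
  induction L with
  | nil => intro s l r hs; simp [PySem.List.enumerate_nil, pvEvens, pvOdds]
  | cons a t ih =>
      intro s l r hs
      rw [PySem.List.enumerate_cons, List.foldl_cons]
      by_cases h : s % 2 = 0
      · have hb : (((s, a).1 % 2 == 0) : Bool) = true := by simp [h]
        rw [if_pos hb, ih (s + 1) _ _ (by omega)]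
        have h1 : (s + 1) % 2 ≠ 0 := by omega
        rw [if_pos h, if_neg h1]
        simp [pvEvens, pvOdds]
      · have hb : ¬ ((((s, a).1 % 2 == 0) : Bool) = true) := by simp [h]
        rw [if_neg hb, ih (s + 1) _ _ (by omega)]
        have h1 : (s + 1) % 2 = 0 := by omega
        rw [if_neg h, if_pos h1]
        simp [pvEvens, pvOdds]

theorem pvB_split_eq (L : List Int) : pvB_split L = (pvEvens L, pvOdds L) := by
  rw [pvB_split, pvB_split_go L 0 [] [] le_rfl]
  simp

-- fuel measure for the worklist
def pvM : List (List Int) → Nat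
  | [] => 0
  | L :: rest => (2 * L.length - 1) + pvM rest

theorem pvB_loop_eq : ∀ (fuel : Nat) (stack SG : List (List Int)),
    (∀ L ∈ stack, 1 ≤ L.length) → pvM stack < fuel →
    pvB_loop fuel stack SG = SG ++ (stack.map pvE).flatten := by
  intro fuel
  induction fuel with
  | zero => intro stack SG _ h; omega
  | succ f ih =>
      intro stack SG hinv hfuel
      match stack with
      | [] => simp [pvB_loop]
      | L :: rest =>
        have hL : 1 ≤ L.length := hinv L (List.mem_cons_self)
        have hrest : ∀ K ∈ rest, 1 ≤ K.length := fun K hK => hinv K (List.mem_cons_of_mem _ hK)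
        rw [pvB_loop]
        by_cases h2 : L.length < 2
        · rw [if_pos h2, ih rest SG hrest (by simp [pvM] at hfuel ⊢; omega)]
          have hE : pvE L = [] := by rw [pvE, dif_pos (by omega)]
          simp [hE]
        · rw [if_neg h2]
          have hsp := pvB_split_eq L
          have hlev := (pvLen_evens_odds L).1
          have hlod := (pvLen_evens_odds L).2
          have hE : pvE L = [pvEvens L, pvOdds L] ++ pvE (pvEvens L) ++ pvE (pvOdds L) := by
            rw [pvE, dif_neg (by omega)]
          by_cases h3 : L.length > 2
          · rw [if_pos h3, hsp]
            rw [ih (pvEvens L :: pvOdds L :: rest) _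
                  (by intro K hK
                      rcases hK with _ | ⟨_, hK⟩
                      · omega
                      · rcases hK with _ | ⟨_, hK⟩
                        · omega
                        · exact hrest K hK)
                  (by simp [pvM] at hfuel ⊢; omega)]
            simp [hE]
          · rw [if_neg h3, hsp]
            have hL2 : L.length = 2 := by omega
            rw [ih rest _ hrest (by simp [pvM] at hfuel ⊢; omega)]
            have hEe : pvE (pvEvens L) = [] := by rw [pvE, dif_pos (by omega)]
            have hEo : pvE (pvOdds L) = [] := by rw [pvE, dif_pos (by omega)]
            simp [hE, hEe, hEo]

-- ===== VERDICT (by name: the statement is the Claim_ definition above) =====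
theorem interleaved_tupled_SG_spec : Claim_equal_interleaved_tupled_SG := by
  intro n _ hpre
  unfold Spec_interleaved_tupled_SG interleaved_tupled_SG interleaved_tupled_SG_alt
  have hpre' : (1 : Int) ≤ n := hpre
  have hlen : (PySem.List.pyRange 0 n 1).length = n.toNat := by
    rw [PySem.List.length_pyRange_one]; omega
  have hnd : (PySem.List.pyRange 0 n 1).Nodup := PySem.List.nodup_pyRange_one 0 n
  show (PySem.List.pyRange 0 n 1) :: pvA_helper (n.toNat + 1) (PySem.List.pyRange 0 n 1)
      = pvB_loop (2 * n.toNat + 1) [PySem.List.pyRange 0 n 1] [PySem.List.pyRange 0 n 1]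
  rw [pvA_helper_eq (n.toNat + 1) _ hnd (by rw [hlen]; omega) (by rw [hlen]; omega)]
  rw [pvB_loop_eq (2 * n.toNat + 1) [PySem.List.pyRange 0 n 1] _
        (by intro L hL
            simp only [List.mem_singleton] at hL
            rw [hL, hlen]; omega)
        (by simp only [pvM, hlen]; omega)]
  simp

@[simp]
theorem interleaved_tupled_SG_raises : Claim_raises_interleaved_tupled_SG := by
  unfold Claim_raises_interleaved_tupled_SG
  constructor
  · intro n _ hr hp
    exact absurd hp (by unfold Pre_interleaved_tupled_SG Raises_interleaved_tupled_SG at *; omega)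
  · exact ⟨by decide, by decide, by decide⟩
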